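-- pv_equiv track=rewrite | github.com/Okaymisba/NED-Python-Labs | Lab 8 (15-Oct-2024)/3. EvenFunction.py | even
-- ===== SOURCE A (Python) =====
-- def even(n):
--     list_of_numbers = []
--     if n < 0:
--         return None
--     else:
--         for i in range(2, n + 1):
--             if i % 2 == 0 or i % 3 == 0:
--                 list_of_numbers.append(i)
--         list_of_numbers_in_given_format = ",".join(str(numbers) for numbers in list_of_numbers)
--         return list_of_numbers_in_given_format
-- ===== SOURCE B (Python) =====
-- def even(n):
--     if n < 0:
--         return None
--     multiples = set(range(2, n + 1, 2)) | set(range(3, n + 1, 3))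
--     return ",".join(str(m) for m in sorted(multiples))
-- ===== Notes on version B (the rewrite author's own statement) =====
-- stated objective: alternative
-- what changed: Instead of scanning every integer in 2..n and testing i%2==0 or i%3==0, B steps directly through the arithmetic progressions range(2,n+1,2) and range(3,n+1,3), takes their set union to deduplicate multiples of 6, sorts, and joins.
import Mathlib
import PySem

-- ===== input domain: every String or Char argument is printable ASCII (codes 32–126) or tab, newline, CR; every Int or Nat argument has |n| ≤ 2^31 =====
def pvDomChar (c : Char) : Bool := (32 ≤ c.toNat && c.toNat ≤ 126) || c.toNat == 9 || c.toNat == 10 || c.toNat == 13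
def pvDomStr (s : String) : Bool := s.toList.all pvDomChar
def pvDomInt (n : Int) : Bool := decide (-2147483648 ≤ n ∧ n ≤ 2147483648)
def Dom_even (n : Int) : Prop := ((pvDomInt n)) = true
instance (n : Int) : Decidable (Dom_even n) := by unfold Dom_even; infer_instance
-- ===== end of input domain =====

-- B replaces A's per-integer divisibility scan of 2..n by stepping through the two
-- arithmetic progressions of multiples of 2 and of 3, deduplicating and sorting (objective: alternative).

-- ===== PORT A =====
def even (n : Int) : Option String :=
  if n < 0 then none
  else
    let list_of_numbers :=
      (PySem.List.pyRange 2 (n + 1) 1).foldl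
        (fun acc i =>
          if PySem.Int.mod i 2 == 0 || PySem.Int.mod i 3 == 0 then acc ++ [i] else acc) []
    some (PySem.Str.join "," (list_of_numbers.map PySem.Int.toStr))

-- ===== PORT B =====
def even_alt (n : Int) : Option String :=
  if n < 0 then none
  else
    let multiples := PySem.Set.ofList
      (PySem.List.pyRange 2 (n + 1) 2 ++ PySem.List.pyRange 3 (n + 1) 3)
    some (PySem.Str.join ","
      ((PySem.List.sorted multiples (fun x => x)).map PySem.Int.toStr))

-- ===== PRECONDITION & SPEC =====
def Spec_even (n : Int) (out : Option String) : Prop := out = even_alt n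
instance (n : Int) (out : Option String) : Decidable (Spec_even n out) := by unfold Spec_even; infer_instance

-- ===== CLAIM (what is proved, stated in full; the proofs are below) =====
def Claim_equal_even : Prop := ∀ (n : Int), Dom_even n → Spec_even n (even n)

-- ===== LEMMAS AND PROOFS =====
theorem even_lists_eq (n : Int) :
    PySem.List.sorted
      (PySem.Set.ofList
        (PySem.List.pyRange 2 (n + 1) 2 ++ PySem.List.pyRange 3 (n + 1) 3)) (fun x => x)
    = (PySem.List.pyRange 2 (n + 1) 1).filter
        (fun i => PySem.Int.mod i 2 == 0 || PySem.Int.mod i 3 == 0) := by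
  apply PySem.List.sorted_eq_of_perm_of_pairwise_lt
  · rw [List.perm_ext_iff_of_nodup
      ((PySem.List.nodup_pyRange_one 2 (n+1)).filter _) (PySem.Set.nodup_ofList _)]
    intro x
    simp only [List.mem_filter, PySem.List.mem_pyRange_one, PySem.Set.mem_ofList,
      List.mem_append, PySem.List.mem_pyRange_iff_of_pos (by norm_num : (0:Int) < 2),
      PySem.List.mem_pyRange_iff_of_pos (by norm_num : (0:Int) < 3),
      Bool.or_eq_true, beq_iff_eq, PySem.Int.mod_eq_zero_iff_dvd]
    omega
  · exact (PySem.List.pairwise_lt_pyRange_one 2 (n+1)).filter _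

theorem even_spec' (n : Int) : even n = even_alt n := by
  unfold even even_alt
  split
  · rfl
  · simp only [PySem.List.foldl_append_if_eq_filter, List.nil_append, even_lists_eq]

-- ===== VERDICT (by name: the statement is the Claim_ definition above) =====
theorem even_spec : Claim_equal_even := by
  intro n _
  exact even_spec' n
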